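-- pv_equiv track=rewrite | github.com/BYolivia/MD2LaTeX | view/syntax_highlighter.py | _find_string_ranges
-- ===== SOURCE A (Python) =====
-- def _find_string_ranges(line: str, delimiters: list[str]) -> list[tuple[int, int]]:
--     """Detecta todos los rangos de cadenas de texto en una línea."""
--     ranges: list[tuple[int, int]] = []
--     i = 0
--     while i < len(line):
--         matched = False
--         for delim in sorted(delimiters, key=len, reverse=True):
--             if line[i:i + len(delim)] == delim:
--                 j = i + len(delim)
--                 while j < len(line):
--                     if line[j] == '\\':
--                         j += 2
--                         continue
--                     if line[j:j + len(delim)] == delim: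
--                         ranges.append((i, j + len(delim)))
--                         i = j + len(delim)
--                         matched = True
--                         break
--                     j += 1
--                 else:
--                     # Cadena sin cerrar: llega al final de la línea
--                     ranges.append((i, len(line)))
--                     i = len(line)
--                     matched = True
--                 break
--         if not matched:
--             i += 1
--     return ranges
-- ===== SOURCE B (Python) =====
-- def _find_string_ranges(line: str, delimiters: list[str]) -> list[tuple[int, int]]:
--     """Single-pass state machine: one flat loop over the line with an
--     explicit inside/outside state, delimiters sorted longest-first once."""
--     ds = sorted(delimiters, key=len, reverse=True)
--     n = len(line)
--     ranges: list[tuple[int, int]] = []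
--     state = None  # None = outside; (delim, start) = inside a string
--     k = 0
--     while k < n:
--         if state is None:
--             for d in ds:
--                 if line[k:k + len(d)] == d:
--                     state = (d, k)
--                     k += len(d)
--                     break
--             else:
--                 k += 1
--         else:
--             d, s = state
--             if line[k] == '\\':
--                 k += 2
--             elif line[k:k + len(d)] == d:
--                 ranges.append((s, k + len(d)))
--                 state = None
--                 k += len(d)
--             else:
--                 k += 1
--     if state is not None:
--         ranges.append((state[1], n))
--     return ranges
-- ===== Notes on version B (the rewrite author's own statement) =====
-- stated objective: alternative
-- what changed: Replaced A's nested loops (outer position scan with an inner closing-delimiter scan restarting per match, re-sorting the delimiters every outer iteration) by a single flat loop over the line with an explicit inside/outside state variable and the delimiters sorted longest-first once.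
-- outside the precondition, e.g. on _find_string_ranges('\\\\', ['']): A returns [(0, 2)], B returns [(0, 2)]
import Mathlib
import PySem

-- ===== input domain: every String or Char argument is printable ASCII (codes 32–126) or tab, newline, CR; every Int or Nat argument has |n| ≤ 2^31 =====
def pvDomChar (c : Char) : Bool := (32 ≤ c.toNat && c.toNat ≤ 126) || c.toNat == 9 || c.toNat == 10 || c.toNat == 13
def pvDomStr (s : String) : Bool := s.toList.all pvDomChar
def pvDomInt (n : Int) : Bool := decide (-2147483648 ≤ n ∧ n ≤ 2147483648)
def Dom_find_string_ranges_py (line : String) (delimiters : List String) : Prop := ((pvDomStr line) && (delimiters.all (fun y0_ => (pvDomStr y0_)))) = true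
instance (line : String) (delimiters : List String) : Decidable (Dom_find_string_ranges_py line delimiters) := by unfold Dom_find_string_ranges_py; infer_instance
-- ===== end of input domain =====

-- B replaces A's nested scans (with a per-position re-sort of the delimiters) by one flat
-- loop with an explicit inside/outside state and the delimiters sorted once (alternative
-- decomposition, similar cost). Equivalence is claimed for delimiter lists without the
-- empty string (Pre_), on which A loops forever for most lines.

-- ===== PORT A =====
-- shared primitive:  line[i:i+len(delim)] == delim   (both Pythons contain this exact test)
def pvMatchAt (cs d : List Char) (i : Nat) : Bool :=
  PySem.List.slice cs (some (i : Int)) (some ((i + d.length : Nat) : Int)) == d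

-- shared primitive:  sorted(delimiters, key=len, reverse=True)  (both Pythons contain it)
def pvSortedDelims (delimiters : List String) : List (List Char) :=
  (PySem.List.sorted delimiters (fun s => PySem.Str.len s) true).map String.toList

-- shared primitive: the for-loop 'for delim in ds: if line[i:i+len(delim)] == delim: … break'
-- returning the first delimiter that matches at i (both Pythons contain this loop)
def pvTryOpen (cs : List Char) (ds : List (List Char)) (i : Nat) : Option (List Char) :=
  match ds with
  | [] => none
  | d :: rest => if pvMatchAt cs d i then some d else pvTryOpen cs rest i

-- A's inner while loop: scan from j for the closing delimiter, skipping '\'-escapes;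
-- some j = position where d closes, none = end of line reached (the 'else' of the while)
def pvScanClose (cs d : List Char) (j : Nat) : Option Nat :=
  if _h : j < cs.length then
    if PySem.List.pyGet? cs (j : Int) == some '\\' then pvScanClose cs d (j + 2)
    else if pvMatchAt cs d j then some j
    else pvScanClose cs d (j + 1)
  else none
termination_by cs.length - j
decreasing_by all_goals omega

-- A's outer while loop; fuel only makes the recursion total (A diverges on the inputs
-- Pre_ excludes); under Pre_ each iteration advances i, so fuel = len(line)+1 suffices
def pvLoopA (cs : List Char) (delimiters : List String) (fuel i : Nat)
    (acc : List (Int × Int)) : List (Int × Int) :=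
  match fuel with
  | 0 => acc
  | fuel + 1 =>
    if i < cs.length then
      match pvTryOpen cs (pvSortedDelims delimiters) i with
      | some d =>
        match pvScanClose cs d (i + d.length) with
        | some j => pvLoopA cs delimiters fuel (j + d.length) (acc ++ [((i : Int), ((j + d.length : Nat) : Int))])
        | none => pvLoopA cs delimiters fuel cs.length (acc ++ [((i : Int), ((cs.length : Nat) : Int))])
      | none => pvLoopA cs delimiters fuel (i + 1) acc
    else acc

def find_string_ranges_py (line : String) (delimiters : List String) : List (Int × Int) :=
  pvLoopA line.toList delimiters (line.toList.length + 1) 0 []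

-- ===== PORT B =====
-- B's single flat loop: k scans the line once; state = none (outside) or some (d, s)
-- (inside a string opened by d at s).  The code after the while loop (the unclosed-string
-- append) is the else-branch of the k < len test.  Fuel as in A's port.
def pvLoopB (cs : List Char) (ds : List (List Char)) (fuel k : Nat)
    (state : Option (List Char × Nat)) (ranges : List (Int × Int)) : List (Int × Int) :=
  match fuel with
  | 0 => ranges ++ (match state with
      | some (_, s) => [((s : Int), ((cs.length : Nat) : Int))]
      | none => [])
  | fuel + 1 =>
    if k < cs.length then
      match state with
      | none =>
        match pvTryOpen cs ds k with
        | some d => pvLoopB cs ds fuel (k + d.length) (some (d, k)) ranges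
        | none => pvLoopB cs ds fuel (k + 1) none ranges
      | some (d, s) =>
        if PySem.List.pyGet? cs (k : Int) == some '\\' then
          pvLoopB cs ds fuel (k + 2) (some (d, s)) ranges
        else if pvMatchAt cs d k then
          pvLoopB cs ds fuel (k + d.length) none (ranges ++ [((s : Int), ((k + d.length : Nat) : Int))])
        else pvLoopB cs ds fuel (k + 1) (some (d, s)) ranges
    else ranges ++ (match state with
      | some (_, s) => [((s : Int), ((cs.length : Nat) : Int))]
      | none => [])

def find_string_ranges_py_alt (line : String) (delimiters : List String) : List (Int × Int) :=
  pvLoopB line.toList (pvSortedDelims delimiters) (line.toList.length + 1) 0 none []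

-- ===== PRECONDITION & SPEC =====
-- Pre_ excludes delimiter lists containing the empty string: there A (and B) loop forever
-- on almost every line (a zero-width delimiter opens and closes at the same position); on
-- the few such inputs where A still terminates (empty line, lines consumed by '\'-skips)
-- B returns the same value, see the cite in claim.json.
def Pre_find_string_ranges_py (_line : String) (delimiters : List String) : Prop :=
  "" ∉ delimiters
instance (line : String) (delimiters : List String) : Decidable (Pre_find_string_ranges_py line delimiters) := by unfold Pre_find_string_ranges_py; infer_instance

def pvWitness_find_string_ranges_py : String × List String := ("a'b\\'c' d", ["'"])

def Spec_find_string_ranges_py (line : String) (delimiters : List String) (out : List (Int × Int)) : Prop := out = find_string_ranges_py_alt line delimiters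
instance (line : String) (delimiters : List String) (out : List (Int × Int)) : Decidable (Spec_find_string_ranges_py line delimiters out) := by unfold Spec_find_string_ranges_py; infer_instance

-- ===== CLAIM (what is proved, stated in full; the proofs are below) =====
def Claim_equal_find_string_ranges_py : Prop := ∀ (line : String) (delimiters : List String), Dom_find_string_ranges_py line delimiters → Pre_find_string_ranges_py line delimiters → Spec_find_string_ranges_py line delimiters (find_string_ranges_py line delimiters)

-- ===== LEMMAS AND PROOFS =====

theorem pvTryOpen_mem {cs : List Char} {ds : List (List Char)} {i : Nat} {d : List Char}
    (h : pvTryOpen cs ds i = some d) : d ∈ ds := by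
  induction ds with
  | nil => simp [pvTryOpen] at h
  | cons e rest ih =>
    unfold pvTryOpen at h
    by_cases he : pvMatchAt cs e i = true
    · simp [he] at h; simp [h]
    · simp [he] at h; exact List.mem_cons_of_mem _ (ih h)

-- every sorted delimiter is nonempty when "" is not among the delimiters
theorem pvSorted_ne_nil {delimiters : List String}
    (hpre : "" ∉ delimiters) : ∀ d ∈ pvSortedDelims delimiters, d ≠ [] := by
  intro d hd
  unfold pvSortedDelims at hd
  rcases List.mem_map.mp hd with ⟨s, hs, rfl⟩
  have hmem : s ∈ delimiters := (PySem.List.mem_sorted _ _ _ _).mp hs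
  intro hnil
  apply hpre
  have hse : s = "" := by simpa using congrArg String.ofList hnil
  exact hse ▸ hmem

-- A's inner scan never moves backwards
theorem pvScanClose_ge (cs d : List Char) :
    ∀ m j jc, cs.length - j ≤ m → pvScanClose cs d j = some jc → j ≤ jc := by
  intro m
  induction m with
  | zero =>
    intro j jc hm h
    unfold pvScanClose at h
    have : ¬ j < cs.length := by omega
    simp [this] at h
  | succ m ih =>
    intro j jc hm h
    unfold pvScanClose at h
    by_cases hj : j < cs.length
    · simp only [hj, dite_true] at h
      by_cases hbs : (PySem.List.pyGet? cs (j : Int) == some '\\') = true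
      · simp only [hbs, if_true] at h
        have := ih (j + 2) jc (by omega) h
        omega
      · simp only [hbs] at h
        by_cases hmt : pvMatchAt cs d j = true
        · simp [hmt] at h; omega
        · simp only [hmt] at h
          have := ih (j + 1) jc (by omega) h
          omega
    · simp [hj] at h

-- B's loop returns the same value for any two sufficient fuels
theorem pvLoopB_fuel (cs : List Char) (ds : List (List Char))
    (hds : ∀ d ∈ ds, d ≠ []) :
    ∀ m k f f' st r, cs.length - k ≤ m → cs.length - k < f → cs.length - k < f' →
      (∀ d s, st = some (d, s) → d ≠ []) →
      pvLoopB cs ds f k st r = pvLoopB cs ds f' k st r := by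
  intro m
  induction m with
  | zero =>
    intro k f f' st r hm hf hf' _
    obtain ⟨f1, rfl⟩ : ∃ f1, f = f1 + 1 := ⟨f - 1, by omega⟩
    obtain ⟨f2, rfl⟩ : ∃ f2, f' = f2 + 1 := ⟨f' - 1, by omega⟩
    have hk : ¬ k < cs.length := by omega
    simp [pvLoopB, hk]
  | succ m ih =>
    intro k f f' st r hm hf hf' hst
    obtain ⟨f1, rfl⟩ : ∃ f1, f = f1 + 1 := ⟨f - 1, by omega⟩
    obtain ⟨f2, rfl⟩ : ∃ f2, f' = f2 + 1 := ⟨f' - 1, by omega⟩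
    by_cases hk : k < cs.length
    · simp only [pvLoopB, hk, if_true]
      match st, hst with
      | none, _ =>
        cases hopen : pvTryOpen cs ds k with
        | none =>
          exact ih (k + 1) f1 f2 none r (by omega) (by omega) (by omega) (by simp)
        | some d =>
          have hd : d ≠ [] := hds d (pvTryOpen_mem hopen)
          have hdl : 1 ≤ d.length := by
            cases d with
            | nil => exact absurd rfl hd
            | cons a t => simp
          exact ih (k + d.length) f1 f2 (some (d, k)) r (by omega) (by omega) (by omega)
            (by intro d' s' h; cases h; exact hd)
      | some (d, s), hst =>
        have hd : d ≠ [] := hst d s rfl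
        have hdl : 1 ≤ d.length := by
          cases d with
          | nil => exact absurd rfl hd
          | cons a t => simp
        by_cases hbs : (PySem.List.pyGet? cs (k : Int) == some '\\') = true
        · simp only [hbs, if_true]
          exact ih (k + 2) f1 f2 (some (d, s)) r (by omega) (by omega) (by omega)
            (by intro d' s' h; cases h; exact hd)
        · simp only [hbs]
          by_cases hmt : pvMatchAt cs d k = true
          · simp only [hmt, if_true]
            exact ih (k + d.length) f1 f2 none _ (by omega) (by omega) (by omega) (by simp)
          · simp only [hmt]
            exact ih (k + 1) f1 f2 (some (d, s)) r (by omega) (by omega) (by omega)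
              (by intro d' s' h; cases h; exact hd)
    · simp [pvLoopB, hk]

-- B's loop started inside a string executes exactly A's inner closing scan
theorem pvLoopB_inside (cs : List Char) (ds : List (List Char)) (d : List Char)
    (hds : ∀ e ∈ ds, e ≠ []) (hd : d ≠ []) :
    ∀ m j s r, cs.length - j ≤ m →
      pvLoopB cs ds (cs.length + 1) j (some (d, s)) r =
        match pvScanClose cs d j with
        | some jc => pvLoopB cs ds (cs.length + 1) (jc + d.length) none
            (r ++ [((s : Int), ((jc + d.length : Nat) : Int))])
        | none => r ++ [((s : Int), ((cs.length : Nat) : Int))] := by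
  have hdl : 1 ≤ d.length := by
    cases d with
    | nil => exact absurd rfl hd
    | cons a t => simp
  intro m
  induction m with
  | zero =>
    intro j s r hm
    have hj : ¬ j < cs.length := by omega
    unfold pvScanClose
    simp [pvLoopB, hj]
  | succ m ih =>
    intro j s r hm
    by_cases hj : j < cs.length
    · have hlen : 0 < cs.length := by omega
      rw [pvScanClose]
      simp only [pvLoopB, hj, if_true, dite_true]
      by_cases hbs : (PySem.List.pyGet? cs (j : Int) == some '\\') = true
      · simp only [hbs, if_true]
        rw [pvLoopB_fuel cs ds hds (cs.length - (j + 2)) (j + 2) cs.length (cs.length + 1)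
          (some (d, s)) r (by omega) (by omega) (by omega)
          (by intro d' s' h; cases h; exact hd)]
        exact ih (j + 2) s r (by omega)
      · simp only [hbs, Bool.false_eq_true, if_false]
        by_cases hmt : pvMatchAt cs d j = true
        · simp only [hmt, if_true]
          rw [pvLoopB_fuel cs ds hds (cs.length - (j + d.length)) (j + d.length) cs.length
            (cs.length + 1) none _ (by omega) (by omega) (by omega) (by simp)]
          rw [pvLoopB]
        · simp only [hmt, Bool.false_eq_true, if_false]
          rw [pvLoopB_fuel cs ds hds (cs.length - (j + 1)) (j + 1) cs.length (cs.length + 1)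
            (some (d, s)) r (by omega) (by omega) (by omega)
            (by intro d' s' h; cases h; exact hd)]
          exact ih (j + 1) s r (by omega)
    · unfold pvScanClose
      simp [pvLoopB, hj]

-- A's loop from i = len(line) returns the accumulator for any fuel
theorem pvLoopA_at_end (cs : List Char) (delimiters : List String) (f : Nat)
    (acc : List (Int × Int)) : pvLoopA cs delimiters f cs.length acc = acc := by
  cases f with
  | zero => rfl
  | succ f => simp [pvLoopA]

-- the two loops agree from any outside position
theorem pvLoop_main (cs : List Char) (delimiters : List String)
    (hpre : "" ∉ delimiters) :
    ∀ m i acc fa, cs.length - i ≤ m → cs.length - i < fa →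
      pvLoopA cs delimiters fa i acc =
        pvLoopB cs (pvSortedDelims delimiters) (cs.length + 1) i none acc := by
  have hds := pvSorted_ne_nil hpre
  intro m
  induction m with
  | zero =>
    intro i acc fa hm hfa
    obtain ⟨f1, rfl⟩ : ∃ f1, fa = f1 + 1 := ⟨fa - 1, by omega⟩
    have hi : ¬ i < cs.length := by omega
    simp [pvLoopA, pvLoopB, hi]
  | succ m ih =>
    intro i acc fa hm hfa
    obtain ⟨f1, rfl⟩ : ∃ f1, fa = f1 + 1 := ⟨fa - 1, by omega⟩
    by_cases hi : i < cs.length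
    · have hlen : 0 < cs.length := by omega
      cases hopen : pvTryOpen cs (pvSortedDelims delimiters) i with
      | none =>
        simp only [pvLoopA, pvLoopB, hi, hopen, if_true]
        rw [ih (i + 1) acc f1 (by omega) (by omega)]
        rw [pvLoopB_fuel cs _ hds (cs.length - (i + 1)) (i + 1) cs.length (cs.length + 1)
          none acc (by omega) (by omega) (by omega) (by simp)]
      | some d =>
        have hd : d ≠ [] := hds d (pvTryOpen_mem hopen)
        have hdl : 1 ≤ d.length := by
          cases d with
          | nil => exact absurd rfl hd
          | cons a t => simp
        simp only [pvLoopA, pvLoopB, hi, hopen, if_true]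
        rw [pvLoopB_fuel cs _ hds (cs.length - (i + d.length)) (i + d.length) cs.length
          (cs.length + 1) (some (d, i)) acc (by omega) (by omega) (by omega)
          (by intro d' s' h; cases h; exact hd)]
        rw [pvLoopB_inside cs _ d hds hd (cs.length - (i + d.length)) (i + d.length) i acc
          (by omega)]
        cases hscan : pvScanClose cs d (i + d.length) with
        | none => exact pvLoopA_at_end cs delimiters f1 _
        | some j =>
          have hge : i + d.length ≤ j :=
            pvScanClose_ge cs d (cs.length - (i + d.length)) (i + d.length) j (by omega) hscan
          exact ih (j + d.length) _ f1 (by omega) (by omega)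
    · simp [pvLoopA, pvLoopB, hi]

-- ===== VERDICT (by name: the statement is the Claim_ definition above) =====
theorem find_string_ranges_py_spec : Claim_equal_find_string_ranges_py := by
  intro line delimiters _hdom hpre
  unfold Spec_find_string_ranges_py find_string_ranges_py find_string_ranges_py_alt
  exact pvLoop_main line.toList delimiters hpre line.toList.length 0 [] (line.toList.length + 1)
    (by omega) (by omega)
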